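-- pv_equiv track=rewrite | github.com/12-Algo/Algo | 20241008/jiyeon/산모양타일링.py | solution
-- ===== SOURCE A (Python) =====
-- def solution(n, tops):
--     answer = 0
--     dp = [1, 0]
--     for i in range(1, 2*n+1):
--         alone, twin = dp[0], dp[1]
--         dp[0] = (alone+twin)%10007
--         dp[1] = alone
--         if(i%2!=0):
--             if(tops[i//2] == 1):
--                 dp[1] += (alone+twin)%10007
--     answer = (dp[0] + dp[1])%10007
--     return answer
-- ===== SOURCE B (Python) =====
-- def solution(n, tops):
--     # One fused transition per column, driven by an explicit while loop.
--     a, b, k = 1, 0, 0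
--     while k < n:
--         t = tops[k]
--         a, b = ((3*a + 2*b) if t == 1 else (2*a + b)) % 10007, (a + b) % 10007
--         k += 1
--     return (a + b) % 10007
-- ===== Notes on version B (the rewrite author's own statement) =====
-- stated objective: simpler
-- what changed: B replaces A's 2n half-step loop over a mutable dp list with its parity branch by a while loop doing one fused closed-form transition (a,b) -> (((3a+2b) if top==1 else (2a+b))%10007,(a+b)%10007) per column.
import Mathlib
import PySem

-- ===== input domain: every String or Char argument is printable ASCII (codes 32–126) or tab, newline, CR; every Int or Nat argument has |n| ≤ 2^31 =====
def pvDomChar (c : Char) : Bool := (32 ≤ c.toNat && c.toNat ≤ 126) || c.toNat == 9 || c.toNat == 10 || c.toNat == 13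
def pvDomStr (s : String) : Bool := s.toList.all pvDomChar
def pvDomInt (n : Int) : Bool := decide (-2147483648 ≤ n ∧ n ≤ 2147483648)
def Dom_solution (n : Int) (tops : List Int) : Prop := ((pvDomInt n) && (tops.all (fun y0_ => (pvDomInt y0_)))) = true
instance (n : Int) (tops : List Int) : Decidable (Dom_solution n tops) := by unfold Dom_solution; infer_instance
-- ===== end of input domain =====

-- B replaces A's 2n half-step dp-list loop with a while loop doing one fused transition per column (objective: simpler).

-- ===== PORT A =====
-- state: some (dp0, dp1), or none once tops[i//2] raised IndexError
def solutionStep (tops : List Int) (st : Option (Int × Int)) (i : Int) : Option (Int × Int) :=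
  match st with
  | none => none
  | some (dp0, dp1) =>
    let alone := dp0
    let twin := dp1
    let d0 := PySem.Int.mod (alone + twin) 10007
    let d1 := alone
    if PySem.Int.mod i 2 ≠ 0 then
      match PySem.List.pyGet? tops (PySem.Int.floordiv i 2) with
      | none => none  -- IndexError
      | some t =>
        if t = 1 then some (d0, d1 + PySem.Int.mod (alone + twin) 10007)
        else some (d0, d1)
    else some (d0, d1)

def solution (n : Int) (tops : List Int) : Int :=
  match (PySem.List.pyRange 1 (2 * n + 1) 1).foldl (solutionStep tops) (some (1, 0)) with
  | some (dp0, dp1) => PySem.Int.mod (dp0 + dp1) 10007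
  | none => 0  -- unreachable under Pre_ (Python raises IndexError)

-- ===== PORT B =====
-- the while loop 'while k < n', as structural recursion on the number of remaining iterations
def solutionAltGo (tops : List Int) (a b k : Int) : Nat → Int
  | 0 => PySem.Int.mod (a + b) 10007
  | m + 1 =>
    match PySem.List.pyGet? tops k with
    | none => 0  -- IndexError; unreachable under Pre_
    | some t =>
        solutionAltGo tops
          (PySem.Int.mod (if t = 1 then 3 * a + 2 * b else 2 * a + b) 10007)
          (PySem.Int.mod (a + b) 10007) (k + 1) m

def solution_alt (n : Int) (tops : List Int) : Int :=
  solutionAltGo tops 1 0 0 n.toNat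

-- ===== PRECONDITION & SPEC =====
-- Pre_ excludes exactly the inputs where Python A raises IndexError (tops shorter than n columns).
def Pre_solution (n : Int) (tops : List Int) : Prop := n ≤ (tops.length : Int)
instance (n : Int) (tops : List Int) : Decidable (Pre_solution n tops) := by unfold Pre_solution; infer_instance
def pvWitness_solution : Int × List Int := (3, [1, 0, 1])

def Spec_solution (n : Int) (tops : List Int) (out : Int) : Prop := out = solution_alt n tops
instance (n : Int) (tops : List Int) (out : Int) : Decidable (Spec_solution n tops out) := by unfold Spec_solution; infer_instance

-- ===== CLAIM (what is proved, stated in full; the proofs are below) =====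
def Claim_equal_solution : Prop := ∀ (n : Int) (tops : List Int), Dom_solution n tops → Pre_solution n tops → Spec_solution n tops (solution n tops)

-- ===== LEMMAS AND PROOFS =====

-- proof-side helper: one fused column step as a fold step over an Option state
def altStep (tops : List Int) (st : Option (Int × Int)) (k : Int) : Option (Int × Int) :=
  match st with
  | none => none
  | some (a, b) =>
    match PySem.List.pyGet? tops k with
    | none => none
    | some t =>
        some (PySem.Int.mod (if t = 1 then 3 * a + 2 * b else 2 * a + b) 10007,
              PySem.Int.mod (a + b) 10007)

theorem foldl_altStep_none (tops : List Int) (l : List Int) :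
    l.foldl (altStep tops) none = none := by
  induction l with
  | nil => rfl
  | cons x xs ih => simpa [altStep] using ih

-- two A half-steps (odd index 2k+1, even index 2k+2) equal one fused column step
theorem two_steps_eq_one (tops : List Int) (st : Option (Int × Int)) (k : Int) :
    solutionStep tops (solutionStep tops st (2 * k + 1)) (2 * k + 2)
      = altStep tops st k := by
  match st with
  | none => rfl
  | some (a, b) =>
    have hdiv' : (2 * k + 1) / 2 = k := by omega
    cases hg : PySem.List.pyGet? tops k with
    | none => simp [solutionStep, altStep, hdiv', hg, PySem.Int.mod, Int.fmod_eq_emod]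
    | some t =>
      by_cases ht : t = 1 <;>
        simp [solutionStep, altStep, hdiv', hg, ht,
          PySem.Int.mod, Int.fmod_eq_emod] <;>
        omega

-- folding A over its 2m half-steps equals folding the fused step over the m columns
theorem fold_pair (tops : List Int) (m : Nat) (st : Option (Int × Int)) :
    (PySem.List.pyRange 1 (2 * (m : Int) + 1) 1).foldl (solutionStep tops) st
      = (PySem.List.pyRange 0 (m : Int) 1).foldl (altStep tops) st := by
  induction m generalizing st with
  | zero => simp [PySem.List.pyRange_one_eq_nil]
  | succ m ih =>
    have hA : PySem.List.pyRange 1 (2 * ((m : Int) + 1) + 1) 1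
        = PySem.List.pyRange 1 (2 * (m : Int) + 1) 1 ++ [2 * (m : Int) + 1, 2 * (m : Int) + 2] := by
      rw [PySem.List.pyRange_one_append 1 (2 * (m : Int) + 1) (2 * ((m : Int) + 1) + 1) (by omega) (by omega)]
      congr 1
      rw [show (2 * ((m : Int) + 1) + 1) = (2 * (m : Int) + 2) + 1 by ring,
        PySem.List.pyRange_one_succ_right (by omega),
        PySem.List.pyRange_one_cons (by omega),
        PySem.List.pyRange_one_eq_nil (by omega)]
      simp
    have hB : PySem.List.pyRange 0 ((m : Int) + 1) 1
        = PySem.List.pyRange 0 (m : Int) 1 ++ [(m : Int)] := by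
      exact PySem.List.pyRange_one_succ_right (by omega)
    push_cast
    rw [hA, hB, List.foldl_append, List.foldl_append, ih]
    simp only [List.foldl_cons, List.foldl_nil]
    exact two_steps_eq_one tops _ (m : Int)

-- B's loop equals folding the fused step over the m columns starting at k
theorem go_eq_fold (tops : List Int) (m : Nat) :
    ∀ (a b k : Int), solutionAltGo tops a b k m
      = match (PySem.List.pyRange k (k + (m : Int)) 1).foldl (altStep tops) (some (a, b)) with
        | some (a, b) => PySem.Int.mod (a + b) 10007
        | none => 0 := by
  induction m with
  | zero =>
    intro a b k
    rw [PySem.List.pyRange_one_eq_nil (by omega)]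
    rfl
  | succ m ih =>
    intro a b k
    rw [PySem.List.pyRange_one_cons (by omega)]
    simp only [List.foldl_cons, solutionAltGo]
    cases hg : PySem.List.pyGet? tops k with
    | none => simp [altStep, hg, foldl_altStep_none]
    | some t =>
      simp only [altStep, hg]
      have hb : k + ((m + 1 : Nat) : Int) = (k + 1) + (m : Int) := by push_cast; ring
      rw [hb, ih]

theorem solution_eq_alt (n : Int) (tops : List Int) : solution n tops = solution_alt n tops := by
  unfold solution solution_alt
  rw [go_eq_fold]
  by_cases hn : n <= 0
  · rw [PySem.List.pyRange_one_eq_nil (by omega), PySem.List.pyRange_one_eq_nil (by omega)]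
    rfl
  · rw [show (0 : Int) + ((n.toNat : Nat) : Int) = ((n.toNat : Nat) : Int) by ring]
    conv_lhs => rw [show n = ((n.toNat : Nat) : Int) from by omega]
    rw [fold_pair]

-- ===== VERDICT (by name: the statement is the Claim_ definition above) =====
theorem solution_spec : Claim_equal_solution := by
  intro n tops _ _
  unfold Spec_solution
  exact solution_eq_alt n tops
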